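-- pv_equiv track=rewrite | github.com/teshchaudhary/DSA | Hashing/Intersection OfTwoArrays.py | func
-- ===== SOURCE A (Python) =====
-- def func(a,b):
--     a = set(a)
--     res_count = 0
--     res_ele = []
--     for i in b:
--         if i in a:
--             res_count += 1
--             res_ele.append(i)
--             a.remove(i)
--
--     return res_count, res_ele
-- ===== SOURCE B (Python) =====
-- def func(a, b):
--     aset = set(a)
--     uniq = list(dict.fromkeys(b))
--     res_ele = [x for x in uniq if x in aset]
--     return len(res_ele), res_ele
-- ===== Notes on version B (the rewrite author's own statement) =====
-- stated objective: simpler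
-- what changed: Replaces A's single stateful pass that mutates the set (removing each matched element to avoid duplicates) with two stateless passes: deduplicate b preserving first-occurrence order via dict.fromkeys, then filter by membership in set(a) and take the length.
import Mathlib
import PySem

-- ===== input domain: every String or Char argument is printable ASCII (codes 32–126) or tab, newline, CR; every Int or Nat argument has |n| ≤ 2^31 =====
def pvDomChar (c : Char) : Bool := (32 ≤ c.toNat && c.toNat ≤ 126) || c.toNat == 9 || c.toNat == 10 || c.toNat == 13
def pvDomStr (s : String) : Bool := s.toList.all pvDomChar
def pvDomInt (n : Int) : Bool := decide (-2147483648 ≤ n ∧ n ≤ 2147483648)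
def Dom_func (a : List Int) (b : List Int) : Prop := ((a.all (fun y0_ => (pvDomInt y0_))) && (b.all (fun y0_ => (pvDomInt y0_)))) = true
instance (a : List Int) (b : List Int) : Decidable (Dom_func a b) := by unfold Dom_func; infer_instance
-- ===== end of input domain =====

-- B replaces A's single set-mutating pass with two stateless passes (ordered dedup of b, then a
-- membership filter against set(a)): simpler decomposition, same result.

-- ===== PORT A =====
-- A: one pass over b with mutable state (set a, count, result); a.remove(i) only runs when
-- 'i in a' holds, so remove? is some there and '.getD st.1' is exact.
def func (a : List Int) (b : List Int) : Int × List Int :=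
  let st := b.foldl
    (fun (st : PySem.Set Int × Int × List Int) i =>
      if PySem.Set.contains st.1 i then
        ((PySem.Set.remove? st.1 i).getD st.1, st.2.1 + 1, st.2.2 ++ [i])
      else st)
    (PySem.Set.ofList a, 0, [])
  (st.2.1, st.2.2)

-- ===== PORT B =====
def func_alt (a : List Int) (b : List Int) : Int × List Int :=
  let aset := PySem.Set.ofList a
  let uniq := PySem.List.dedup b
  let res := uniq.filter (fun x => PySem.Set.contains aset x)
  ((res.length : Int), res)

-- ===== PRECONDITION & SPEC =====
def Spec_func (a : List Int) (b : List Int) (out : Int × List Int) : Prop := out = func_alt a b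
instance (a : List Int) (b : List Int) (out : Int × List Int) : Decidable (Spec_func a b out) := by unfold Spec_func; infer_instance

-- ===== CLAIM (what is proved, stated in full; the proofs are below) =====
def Claim_equal_func : Prop := ∀ (a : List Int) (b : List Int), Dom_func a b → Spec_func a b (func a b)

-- ===== LEMMAS AND PROOFS =====

-- the list A's loop appends, as a recursion on b with the shrinking set
def pvG : PySem.Set Int → List Int → List Int
  | _, [] => []
  | s, i :: b => if PySem.Set.contains s i then i :: pvG (PySem.Set.discard s i) b else pvG s b

theorem pvG_loop (b : List Int) : ∀ (s : PySem.Set Int) (c : Int) (r : List Int),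
    (b.foldl
      (fun (st : PySem.Set Int × Int × List Int) i =>
        if PySem.Set.contains st.1 i then
          ((PySem.Set.remove? st.1 i).getD st.1, st.2.1 + 1, st.2.2 ++ [i])
        else st)
      (s, c, r)).2 = (c + (pvG s b).length, r ++ pvG s b) := by
  induction b with
  | nil => intro s c r; simp [pvG]
  | cons i b ih =>
    intro s c r
    by_cases h : PySem.Set.contains s i = true
    · have hm : i ∈ s := (PySem.Set.contains_iff s i).mp h
      simp only [List.foldl_cons, h, if_pos, pvG, PySem.Set.remove?_of_mem hm,
        Option.getD_some, ih]
      rw [Prod.mk.injEq]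
      refine ⟨by push_cast [List.length_cons]; ring, by simp⟩
    · simp only [List.foldl_cons, h, if_neg, pvG, Bool.false_eq_true, ih]
      simp [h]

theorem contains_discard (s : PySem.Set Int) (i x : Int) :
    PySem.Set.contains (PySem.Set.discard s i) x = (PySem.Set.contains s x && !(x == i)) := by
  by_cases hx : x ∈ s <;> by_cases hxi : x = i <;>
    simp [PySem.Set.contains_eq_listContains, List.contains_iff_mem,
      PySem.Set.mem_discard, hx, hxi]

theorem pvG_eq_filter (b : List Int) : ∀ (s : PySem.Set Int),
    pvG s b = (PySem.List.dedup b).filter (fun x => PySem.Set.contains s x) := by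
  induction b with
  | nil => intro s; simp [pvG, PySem.List.dedup]
  | cons i b ih =>
    intro s
    have hd : PySem.List.dedup (i :: b) = i :: (PySem.Set.ofList b).discard i := by
      simp [PySem.List.dedup, PySem.Set.ofList_cons]
    rw [hd]
    by_cases h : PySem.Set.contains s i = true
    · simp only [pvG, h, if_pos, List.filter_cons, ih]
      congr 1
      rw [show PySem.Set.discard (PySem.Set.ofList b) i
            = (PySem.Set.ofList b).filter (fun y => !(y == i)) from rfl,
          List.filter_filter, show PySem.List.dedup b = PySem.Set.ofList b from rfl]
      apply List.filter_congr
      intro x _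
      rw [contains_discard]
    · simp only [pvG, h, Bool.false_eq_true, if_neg, not_false_iff, List.filter_cons, ih]
      rw [show PySem.Set.discard (PySem.Set.ofList b) i
            = (PySem.Set.ofList b).filter (fun y => !(y == i)) from rfl,
          List.filter_filter, show PySem.List.dedup b = PySem.Set.ofList b from rfl]
      apply List.filter_congr
      intro x _
      by_cases hxi : x = i
      · subst hxi; rw [Bool.not_eq_true] at h; rw [h]; simp
      · simp [hxi]

-- ===== VERDICT (by name: the statement is the Claim_ definition above) =====
theorem func_spec : Claim_equal_func := by
  intro a b _
  show func a b = func_alt a b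
  unfold func func_alt
  simp only [pvG_loop b (PySem.Set.ofList a) 0 [], List.nil_append, zero_add,
    pvG_eq_filter b (PySem.Set.ofList a)]
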